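-- pv_equiv track=rewrite | github.com/lokinko/RayFL | dataset/rec_utils.py | group_seperate_items_by_ratings
-- ===== SOURCE A (Python) =====
-- def group_seperate_items_by_ratings(users, items, ratings):
--     user_dict = {}
--     for (user, item, rating) in zip(users, items, ratings):
--         if user not in user_dict:
--             user_dict[user] = {'positive_items': [], 'negative_items': []}
--         if rating == 1:
--             user_dict[user]['positive_items'].append(item)
--         else:
--             user_dict[user]['negative_items'].append(item)
--     return user_dict
-- ===== SOURCE B (Python) =====
-- def group_seperate_items_by_ratings(users, items, ratings):
--     # Phase 1: collect per-user (item, rating) pairs in first-seen order.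
--     groups = {}
--     for user, item, rating in zip(users, items, ratings):
--         groups.setdefault(user, []).append((item, rating))
--     # Phase 2: classify each user's pairs into positive/negative item lists.
--     return {user: {'positive_items': [it for it, r in pairs if r == 1],
--                    'negative_items': [it for it, r in pairs if r != 1]}
--             for user, pairs in groups.items()}
-- ===== Notes on version B (the rewrite author's own statement) =====
-- stated objective: alternative
-- what changed: B splits the work into a collect phase (ordered dict user -> list of (item, rating) pairs) and a separate classify phase producing the positive/negative lists per user, instead of A's inline classification into nested dicts during the single loop.
import Mathlib
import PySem

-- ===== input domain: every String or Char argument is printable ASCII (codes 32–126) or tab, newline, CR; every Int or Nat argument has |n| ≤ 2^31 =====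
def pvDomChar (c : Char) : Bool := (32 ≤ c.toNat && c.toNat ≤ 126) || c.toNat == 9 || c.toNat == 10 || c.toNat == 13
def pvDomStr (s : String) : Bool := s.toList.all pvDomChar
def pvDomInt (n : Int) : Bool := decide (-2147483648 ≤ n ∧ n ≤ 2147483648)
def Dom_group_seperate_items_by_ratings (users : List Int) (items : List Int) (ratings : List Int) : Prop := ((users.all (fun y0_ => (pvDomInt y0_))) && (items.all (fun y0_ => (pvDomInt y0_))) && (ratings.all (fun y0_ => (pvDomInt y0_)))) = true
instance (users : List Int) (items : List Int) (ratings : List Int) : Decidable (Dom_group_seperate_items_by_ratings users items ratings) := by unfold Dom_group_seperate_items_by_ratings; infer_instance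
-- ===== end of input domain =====

-- B changes the decomposition: a collect phase grouping (item, rating) pairs per user, then a
-- separate classify phase building each user's positive/negative lists; same cost, no speed claim.

-- ===== PORT A =====
-- one iteration of A's loop body: conditional fresh nested dict, then append into the rating's list
def pvStepA (d : PySem.Dict Int (PySem.Dict String (List Int)))
    (t : Int × Int × Int) : PySem.Dict Int (PySem.Dict String (List Int)) :=
  let d1 := if d.contains t.1 then d
            else d.insert t.1 (PySem.Dict.ofList [("positive_items", []), ("negative_items", [])])
  if t.2.2 = 1 then
    d1.modify t.1 PySem.Dict.empty (fun inner => inner.modify "positive_items" [] (· ++ [t.2.1]))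
  else
    d1.modify t.1 PySem.Dict.empty (fun inner => inner.modify "negative_items" [] (· ++ [t.2.1]))

def group_seperate_items_by_ratings (users : List Int) (items : List Int) (ratings : List Int) : List (Int × List (String × List Int)) :=
  let d := (users.zip (items.zip ratings)).foldl pvStepA PySem.Dict.empty
  d.items.map (fun p => (p.1, p.2.items))

-- ===== PORT B =====
def group_seperate_items_by_ratings_alt (users : List Int) (items : List Int) (ratings : List Int) : List (Int × List (String × List Int)) :=
  let g := (users.zip (items.zip ratings)).foldl
      (fun d t => d.modify t.1 [] (· ++ [t.2])) PySem.Dict.empty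
  g.items.map (fun p =>
    (p.1, [("positive_items", (p.2.filter (fun q => q.2 == 1)).map (·.1)),
           ("negative_items", (p.2.filter (fun q => !(q.2 == 1))).map (·.1))]))

-- ===== PRECONDITION & SPEC =====
def Spec_group_seperate_items_by_ratings (users : List Int) (items : List Int) (ratings : List Int) (out : List (Int × List (String × List Int))) : Prop := out = group_seperate_items_by_ratings_alt users items ratings
instance (users : List Int) (items : List Int) (ratings : List Int) (out : List (Int × List (String × List Int))) : Decidable (Spec_group_seperate_items_by_ratings users items ratings out) := by unfold Spec_group_seperate_items_by_ratings; infer_instance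

-- ===== CLAIM (what is proved, stated in full; the proofs are below) =====
def Claim_equal_group_seperate_items_by_ratings : Prop := ∀ (users : List Int) (items : List Int) (ratings : List Int), Dom_group_seperate_items_by_ratings users items ratings → Spec_group_seperate_items_by_ratings users items ratings (group_seperate_items_by_ratings users items ratings)

-- ===== LEMMAS AND PROOFS =====

-- the inner-dict update A performs for one (item, rating) pair
def pvInnerStep (inner : PySem.Dict String (List Int)) (q : Int × Int) : PySem.Dict String (List Int) :=
  if q.2 = 1 then inner.modify "positive_items" [] (· ++ [q.1])
  else inner.modify "negative_items" [] (· ++ [q.1])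

def pvInner (P N : List Int) : PySem.Dict String (List Int) :=
  PySem.Dict.mk [("positive_items", P), ("negative_items", N)]

lemma pvModify_eq {κ ν : Type} [BEq κ] (d : PySem.Dict κ ν) (k : κ) (d0 : ν) (f : ν → ν) :
    d.modify k d0 f = d.insert k (f (d.getD k d0)) := rfl

lemma pvOfList_inner :
    PySem.Dict.ofList [("positive_items", ([] : List Int)), ("negative_items", [])] = pvInner [] [] := by
  decide

lemma pvInnerStep_mk (P N : List Int) (q : Int × Int) :
    pvInnerStep (pvInner P N) q = if q.2 = 1 then pvInner (P ++ [q.1]) N else pvInner P (N ++ [q.1]) := by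
  by_cases h : q.2 = 1 <;>
    simp [pvInnerStep, pvInner, h, PySem.Dict.modify, PySem.Dict.getD, PySem.Dict.get?,
      PySem.Dict.insert, PySem.Dict.contains]

lemma pvInner_fold (qs : List (Int × Int)) (P N : List Int) :
    qs.foldl pvInnerStep (pvInner P N) =
      pvInner (P ++ (qs.filter (fun q => q.2 == 1)).map (·.1))
              (N ++ (qs.filter (fun q => !(q.2 == 1))).map (·.1)) := by
  induction qs generalizing P N with
  | nil => simp
  | cons q qs ih =>
    rw [List.foldl_cons, pvInnerStep_mk]
    by_cases h : q.2 = 1 <;> simp [h, ih]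

lemma pvStepA_get? (d : PySem.Dict Int (PySem.Dict String (List Int))) (t : Int × Int × Int) (u : Int) :
    (pvStepA d t).get? u =
      if u = t.1 then some (pvInnerStep ((d.get? t.1).getD (pvInner [] [])) t.2)
      else d.get? u := by
  unfold pvStepA pvInnerStep
  by_cases hc : d.contains t.1
  · obtain ⟨inner, hin⟩ : ∃ v, d.get? t.1 = some v := by
      have := PySem.Dict.contains_eq_isSome_get? d t.1
      rw [hc] at this
      exact Option.isSome_iff_exists.mp this.symm
    by_cases hr : t.2.2 = 1 <;>
      simp [hc, hr, pvModify_eq, PySem.Dict.get?_insert, PySem.Dict.getD_eq_get?_getD, hin]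
  · have hn : d.get? t.1 = none := by
      have := PySem.Dict.contains_eq_isSome_get? d t.1
      rw [Bool.not_eq_true] at hc
      rw [hc] at this
      cases h : d.get? t.1 <;> simp [h] at this ⊢
    by_cases hr : t.2.2 = 1 <;>
      simp [hc, hr, pvModify_eq, PySem.Dict.insert_insert_self, PySem.Dict.get?_insert,
        PySem.Dict.getD_eq_get?_getD, hn, pvOfList_inner]

lemma pvStepA_keys (d : PySem.Dict Int (PySem.Dict String (List Int))) (t : Int × Int × Int) :
    (pvStepA d t).keys = PySem.Set.add d.keys t.1 := by
  unfold pvStepA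
  by_cases hc : d.contains t.1
  · have hm : t.1 ∈ d.keys := (PySem.Dict.contains_iff_mem_keys d t.1).mp hc
    by_cases hr : t.2.2 = 1 <;>
      simp [hc, hr, pvModify_eq, PySem.Dict.keys_insert_of_contains _ _ hc,
        PySem.Set.add_of_mem hm]
  · have hm : t.1 ∉ d.keys := fun h => hc ((PySem.Dict.contains_iff_mem_keys d t.1).mpr h)
    rw [Bool.not_eq_true] at hc
    by_cases hr : t.2.2 = 1 <;>
      simp [hc, hr, pvModify_eq, PySem.Dict.insert_insert_self,
        PySem.Dict.keys_insert_of_not_contains _ _ hc, PySem.Set.add_of_not_mem hm]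

lemma pvFoldA_keys (ts : List (Int × Int × Int)) (d : PySem.Dict Int (PySem.Dict String (List Int))) :
    (ts.foldl pvStepA d).keys = PySem.Set.update d.keys (ts.map (·.1)) := by
  induction ts generalizing d with
  | nil => simp [PySem.Set.update]
  | cons t ts ih => rw [List.foldl_cons, ih, pvStepA_keys, List.map_cons, PySem.Set.update_cons]

set_option maxRecDepth 4000 in
lemma pvFoldA_get? (ts : List (Int × Int × Int)) (d : PySem.Dict Int (PySem.Dict String (List Int))) (u : Int) :
    (ts.foldl pvStepA d).get? u =
      if d.contains u ∨ u ∈ ts.map (·.1) then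
        some (((ts.filter (fun t => t.1 == u)).map (·.2)).foldl pvInnerStep
          ((d.get? u).getD (pvInner [] [])))
      else none := by
  induction ts generalizing d with
  | nil =>
    by_cases hc : d.contains u
    · obtain ⟨inner, hin⟩ : ∃ v, d.get? u = some v := by
        have := PySem.Dict.contains_eq_isSome_get? d u
        rw [hc] at this
        exact Option.isSome_iff_exists.mp this.symm
      simp [hc, hin]
    · have hn : d.get? u = none := by
        have := PySem.Dict.contains_eq_isSome_get? d u
        rw [Bool.not_eq_true] at hc
        rw [hc] at this
        cases h : d.get? u <;> simp [h] at this ⊢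
      simp [hc, hn]
  | cons t ts ih =>
    rw [List.foldl_cons, ih]
    have hcstep : (pvStepA d t).contains u = ((u == t.1) || d.contains u) := by
      rw [PySem.Dict.contains_eq_isSome_get?, PySem.Dict.contains_eq_isSome_get?, pvStepA_get?]
      by_cases h : u = t.1 <;> simp [h]
    by_cases h : u = t.1
    · subst h
      rw [hcstep, pvStepA_get? d t t.1, if_pos rfl]
      simp
    · have hne : (t.1 == u) = false := by
        rw [beq_eq_false_iff_ne]; exact fun he => h he.symm
      have hne' : (u == t.1) = false := by rw [beq_eq_false_iff_ne]; exact h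
      rw [hcstep, hne', pvStepA_get? d t u, if_neg h, List.filter_cons]
      simp only [Bool.false_or, hne]
      exact if_congr (by rw [List.map_cons]; simp [List.mem_cons, h]) rfl rfl

-- B's grouping fold, named so both final maps range over the same dict shape
lemma pvFoldB_keys (ts : List (Int × Int × Int)) :
    (ts.foldl (fun d t => d.modify t.1 [] (· ++ [t.2])) (PySem.Dict.empty (κ := Int) (ν := List (Int × Int)))).keys
      = PySem.Set.update ([] : List Int) (ts.map (·.1)) := by
  have := PySem.Dict.keys_foldl_modify_key ts (·.1) ([] : List (Int × Int))
      (fun _ t v => v ++ [t.2]) PySem.Dict.empty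
  simpa using this

-- ===== VERDICT (by name: the statement is the Claim_ definition above) =====
theorem group_seperate_items_by_ratings_spec : Claim_equal_group_seperate_items_by_ratings := by
  intro users items ratings _
  unfold Spec_group_seperate_items_by_ratings
  unfold group_seperate_items_by_ratings group_seperate_items_by_ratings_alt
  dsimp only
  set ts := users.zip (items.zip ratings) with hts
  set dA := ts.foldl pvStepA PySem.Dict.empty with hdA
  set g := ts.foldl (fun d t => d.modify t.1 [] (· ++ [t.2]))
      (PySem.Dict.empty (κ := Int) (ν := List (Int × Int))) with hg
  have hkeysB : g.keys = PySem.Set.update ([] : List Int) (ts.map (·.1)) := pvFoldB_keys ts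
  have hkeysA : dA.keys = PySem.Set.update ([] : List Int) (ts.map (·.1)) := by
    rw [hdA, pvFoldA_keys]; simp
  have hndB : g.keys.Nodup :=
    PySem.Dict.nodup_keys_foldl_modify_key ts (·.1) [] (fun _ t v => v ++ [t.2]) _ (by simp)
  have hndA : dA.keys.Nodup := by rw [hkeysA, ← hkeysB]; exact hndB
  rw [PySem.Dict.items_eq_map_keys dA hndA (pvInner [] []),
      PySem.Dict.items_eq_map_keys g hndB [], hkeysA, hkeysB, List.map_map, List.map_map]
  apply List.map_congr_left
  intro k hk
  have hkmem : k ∈ ts.map (·.1) := by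
    rcases (PySem.Set.mem_update _ _ _).mp hk with h | h
    · simp at h
    · exact h
  have hA : dA.get? k =
      some (((ts.filter (fun t => t.1 == k)).map (·.2)).foldl pvInnerStep (pvInner [] [])) := by
    rw [hdA, pvFoldA_get?]
    simp [hkmem]
  have hB : g.getD k [] = (ts.filter (fun t => t.1 == k)).map (·.2) := by
    rw [hg]
    have := PySem.Dict.getD_foldl_modify_append ts (PySem.Dict.empty (κ := Int) (ν := List (Int × Int))) k
    simpa using this
  have hAD : dA.getD k (pvInner [] []) =
      ((ts.filter (fun t => t.1 == k)).map (·.2)).foldl pvInnerStep (pvInner [] []) := by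
    rw [PySem.Dict.getD_eq_get?_getD, hA]; rfl
  simp only [Function.comp_apply]
  rw [hAD, hB, pvInner_fold]
  simp [pvInner]
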